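-- pv_equiv track=rewrite | github.com/jk-jung/problem-solving | codewars/7kyu/7_Multiple remainder of the division.py | is_multiple
-- ===== SOURCE A (Python) =====
-- def is_multiple(a, b, n):
--     a = a % b
--     r = 0
--     i = 0
--     while True:
--         a *= 10
--         r = r * 10 + a // b
--         a %= b
--         i += 1
--         if i == 2:break
--     if r % 10 >= 5: r += 10
--     r //= 10
--     if r % 10 == 0:return False
--     return r % n == 0
-- ===== SOURCE B (Python) =====
-- def is_multiple(a, b, n):
--     # closed form: the two-step long division computes the first two decimal
--     # digits of (a % b)/b directly as (a % b) * 100 // b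
--     r = (a % b) * 100 // b
--     d = (r + 5) // 10          # half-up rounding of the first decimal digit
--     if d % 10 == 0:
--         return False
--     return d % n == 0
-- ===== Notes on version B (the rewrite author's own statement) =====
-- stated objective: simpler
-- what changed: Replaces the 2-iteration long-division while-loop and the conditional +10 rounding step with a direct closed-form computation r = (a%b)*100//b and half-up rounding d = (r+5)//10.
import Mathlib
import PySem

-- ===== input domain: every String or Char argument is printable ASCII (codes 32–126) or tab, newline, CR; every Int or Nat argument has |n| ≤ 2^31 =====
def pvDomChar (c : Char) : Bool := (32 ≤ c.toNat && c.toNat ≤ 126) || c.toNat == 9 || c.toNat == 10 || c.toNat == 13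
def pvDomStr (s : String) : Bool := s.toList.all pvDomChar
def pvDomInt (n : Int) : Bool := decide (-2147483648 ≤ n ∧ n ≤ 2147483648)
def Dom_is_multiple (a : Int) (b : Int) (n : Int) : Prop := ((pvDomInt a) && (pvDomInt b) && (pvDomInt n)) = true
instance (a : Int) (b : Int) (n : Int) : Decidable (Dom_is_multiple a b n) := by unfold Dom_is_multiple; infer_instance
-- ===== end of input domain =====

-- B replaces A's fixed two-iteration long-division loop and conditional rounding with
-- the closed form r = (a%b)*100//b, d = (r+5)//10 (objective: simpler; same O(1) cost).


-- ===== PORT A =====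
-- A's 'while True' loop runs exactly twice (break at i == 2): modeled as recursion on the
-- remaining iteration count, same state (a, r) and same body, called with count 2.
def isMultipleLoopA (b : Int) : Int → Int → Nat → Int
  | _, r, 0 => r
  | a, r, k + 1 =>
      let a := a * 10
      let r := r * 10 + PySem.Int.floordiv a b
      let a := PySem.Int.mod a b
      isMultipleLoopA b a r k

def is_multiple (a : Int) (b : Int) (n : Int) : Bool :=
  let a := PySem.Int.mod a b
  let r := isMultipleLoopA b a 0 2
  let r := if PySem.Int.mod r 10 ≥ 5 then r + 10 else r
  let r := PySem.Int.floordiv r 10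
  if PySem.Int.mod r 10 = 0 then false
  else decide (PySem.Int.mod r n = 0)

-- ===== PORT B =====
def is_multiple_alt (a : Int) (b : Int) (n : Int) : Bool :=
  let r := PySem.Int.floordiv (PySem.Int.mod a b * 100) b
  let d := PySem.Int.floordiv (r + 5) 10
  if PySem.Int.mod d 10 = 0 then false
  else decide (PySem.Int.mod d n = 0)

-- ===== PRECONDITION & SPEC =====
-- Pre_ excludes exactly where A raises ZeroDivisionError: b = 0, and n = 0 when the
-- half-up-rounded first decimal digit is nonzero (A reaches 'r % n'); when n = 0 but that
-- digit is 0, A returns False before dividing by n, so those inputs stay inside Pre_.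
def Pre_is_multiple (a : Int) (b : Int) (n : Int) : Prop :=
  b ≠ 0 ∧ (n ≠ 0 ∨
    PySem.Int.mod (PySem.Int.floordiv (PySem.Int.floordiv (PySem.Int.mod a b * 100) b + 5) 10) 10 = 0)
instance (a : Int) (b : Int) (n : Int) : Decidable (Pre_is_multiple a b n) := by
  unfold Pre_is_multiple; infer_instance
def pvWitness_is_multiple : Int × Int × Int := (7, 9, 3)

def Spec_is_multiple (a : Int) (b : Int) (n : Int) (out : Bool) : Prop := out = is_multiple_alt a b n
instance (a : Int) (b : Int) (n : Int) (out : Bool) : Decidable (Spec_is_multiple a b n out) := by unfold Spec_is_multiple; infer_instance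

-- ===== CLAIM (what is proved, stated in full; the proofs are below) =====
def Claim_equal_is_multiple : Prop := ∀ (a : Int) (b : Int) (n : Int), Dom_is_multiple a b n → Pre_is_multiple a b n → Spec_is_multiple a b n (is_multiple a b n)

-- ===== LEMMAS AND PROOFS =====

-- The two long-division steps compute the closed-form two-digit quotient.
theorem twoStep_eq (b m : Int) (hb : b ≠ 0) :
    PySem.Int.floordiv (m * 10) b * 10
      + PySem.Int.floordiv (PySem.Int.mod (m * 10) b * 10) b
    = PySem.Int.floordiv (m * 100) b := by
  have h : PySem.Int.floordiv (m * 10) b * b + PySem.Int.mod (m * 10) b = m * 10 :=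
    PySem.Int.floordiv_mul_add_mod _ _
  have hm : m * 100 = PySem.Int.mod (m * 10) b * 10 + (PySem.Int.floordiv (m * 10) b * 10) * b := by
    linarith
  show _ = Int.fdiv (m * 100) b
  rw [hm, Int.add_mul_fdiv_right _ _ hb]
  show Int.fdiv (m * 10) b * 10 + Int.fdiv (Int.fmod (m * 10) b * 10) b
      = Int.fdiv (Int.fmod (m * 10) b * 10) b + Int.fdiv (m * 10) b * 10
  ring

-- Half-up rounding: the conditional +10 then //10 equals (r + 5) // 10.
theorem roundHalfUp_eq (r : Int) :
    PySem.Int.floordiv (if PySem.Int.mod r 10 ≥ 5 then r + 10 else r) 10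
      = PySem.Int.floordiv (r + 5) 10 := by
  have h10 : (0 : Int) < 10 := by norm_num
  rw [PySem.Int.mod_eq_emod_of_pos h10]
  split_ifs with h <;>
    rw [PySem.Int.floordiv_eq_ediv_of_pos h10, PySem.Int.floordiv_eq_ediv_of_pos h10] <;>
    omega

-- ===== VERDICT (by name: the statement is the Claim_ definition above) =====
theorem is_multiple_spec : Claim_equal_is_multiple := by
  intro a b n _ hpre
  obtain ⟨hb, -⟩ := hpre
  unfold Spec_is_multiple is_multiple is_multiple_alt
  simp only [isMultipleLoopA]
  rw [show (0 : Int) * 10 + PySem.Int.floordiv (PySem.Int.mod a b * 10) b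
        = PySem.Int.floordiv (PySem.Int.mod a b * 10) b by ring]
  have hloop :
      PySem.Int.floordiv (PySem.Int.mod a b * 10) b * 10
        + PySem.Int.floordiv (PySem.Int.mod (PySem.Int.mod a b * 10) b * 10) b
      = PySem.Int.floordiv (PySem.Int.mod a b * 100) b := by
    have := twoStep_eq b (PySem.Int.mod a b) hb
    linarith
  rw [hloop, roundHalfUp_eq]
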